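-- pv_equiv track=rewrite | github.com/mehra-rohit/Data-Structures-and-Algorithms | Algorithms/Sliding Window/Sliding Window Variable.py | sliding_window_var
-- ===== SOURCE A (Python) =====
-- def sliding_window_var(nums: list[int]) -> int:
--     L = 0
--     length = 0
--
--     for R in range(len(nums)):
--         if nums[R] != nums[L]:
--             L = R
--
--         length = max(length, R - L + 1)
--
--     return length
-- ===== SOURCE B (Python) =====
-- def sliding_window_var(nums: list[int]) -> int:
--     # Run-length encode the list into maximal runs of equal consecutive
--     # elements, then return the largest run length (0 for an empty list).
--     lengths = []
--     n = len(nums)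
--     i = 0
--     while i < n:
--         j = i + 1
--         while j < n and nums[j] == nums[i]:
--             j += 1
--         lengths.append(j - i)
--         i = j
--     return max(lengths, default=0)
-- ===== Notes on version B (the rewrite author's own statement) =====
-- stated objective: alternative
-- what changed: Replaces the index-based two-pointer sliding window with a rolling max by a run-length-encoding pass: split the list into maximal runs of equal consecutive elements, collect the run lengths, and return their maximum (default 0 for the empty list).
import Mathlib
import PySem

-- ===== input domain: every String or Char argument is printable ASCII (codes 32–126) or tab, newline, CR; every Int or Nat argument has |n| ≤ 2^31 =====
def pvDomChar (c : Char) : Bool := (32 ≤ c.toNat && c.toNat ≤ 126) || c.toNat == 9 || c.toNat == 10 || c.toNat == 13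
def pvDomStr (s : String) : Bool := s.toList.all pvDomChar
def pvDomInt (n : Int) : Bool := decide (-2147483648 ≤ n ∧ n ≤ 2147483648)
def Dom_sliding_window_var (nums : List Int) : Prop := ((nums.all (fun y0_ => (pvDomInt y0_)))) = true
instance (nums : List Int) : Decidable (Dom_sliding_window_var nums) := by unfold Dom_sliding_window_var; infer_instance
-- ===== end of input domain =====

-- B replaces A's index-based two-pointer sliding window by a run-length-encoding pass
-- (split into maximal runs of equal consecutive elements, take the largest run length).

-- ===== PORT A =====
-- body of A's `for R in range(len(nums))` loop; state st = (L, length).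
-- Indices R and st.1 (= L) are always in range (0 ≤ L ≤ R < len nums), so pyGetD's default 0 is never used.
def pvStepA (nums : List Int) (st : Int × Int) (R : Int) : Int × Int :=
  let L := if PySem.List.pyGetD nums R 0 ≠ PySem.List.pyGetD nums st.1 0 then R else st.1
  (L, max st.2 (R - L + 1))

def sliding_window_var (nums : List Int) : Int :=
  ((PySem.List.pyRange 0 (nums.length : Int) 1).foldl (pvStepA nums) (0, 0)).2

-- ===== PORT B =====
-- inner `while j < n and nums[j] == nums[i]`: number of further leading copies of the run's value x
def pvLeadRun (x : Int) : List Int → Nat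
  | [] => 0
  | y :: ys => if y = x then pvLeadRun x ys + 1 else 0

-- outer `while i < n:` loop: the list `lengths` of run lengths; advancing i to j is dropping the run
def pvRunLens : List Int → List Int
  | [] => []
  | x :: xs =>
    let k := pvLeadRun x xs
    ((k : Int) + 1) :: pvRunLens (xs.drop k)
termination_by l => l.length
decreasing_by simp

def sliding_window_var_alt (nums : List Int) : Int :=
  PySem.List.maxD (pvRunLens nums) (fun y => y) 0

-- ===== PRECONDITION & SPEC =====
def Spec_sliding_window_var (nums : List Int) (out : Int) : Prop := out = sliding_window_var_alt nums
instance (nums : List Int) (out : Int) : Decidable (Spec_sliding_window_var nums out) := by unfold Spec_sliding_window_var; infer_instance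

-- ===== CLAIM (what is proved, stated in full; the proofs are below) =====
def Claim_equal_sliding_window_var : Prop := ∀ (nums : List Int), Dom_sliding_window_var nums → Spec_sliding_window_var nums (sliding_window_var nums)

-- ===== LEMMAS AND PROOFS =====

-- common intermediate form of A's loop: state (L, length) re-expressed as
-- (current run value v, current run length c, best so far m) over the remaining suffix
def aLoop : Int → Int → Int → List Int → Int
  | _, _, m, [] => m
  | v, c, m, x :: xs => if x ≠ v then aLoop x 1 (max m 1) xs else aLoop v (c+1) (max m (c+1)) xs

lemma pvGetD_drop_head (nums : List Int) (i : Int) (x : Int) (rest : List Int)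
    (hi : 0 ≤ i) (h : nums.drop i.toNat = x :: rest) :
    PySem.List.pyGetD nums i 0 = x := by
  have h0 : nums[i.toNat]? = some x := by
    have h1 : (nums.drop i.toNat)[0]? = nums[i.toNat + 0]? := List.getElem?_drop
    simpa [h] using h1.symm
  rw [PySem.List.pyGetD_of_nonneg nums 0 hi]
  simp [List.getD_eq_getElem?_getD, h0]

-- loop invariant of A: after reaching index R0 with current run of length c (so L = R0 - c
-- and nums[L] is the run's value), the rest of the fold computes aLoop on the remaining suffix
lemma aFold (xs : List Int) (nums : List Int) (R0 c m : Int)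
    (hc : 0 ≤ c) (hcR : c ≤ R0)
    (hdrop : nums.drop R0.toNat = xs)
    (hlen : R0 + xs.length = nums.length) :
    ((PySem.List.pyRange R0 (nums.length : Int) 1).foldl (pvStepA nums) (R0 - c, m)).2
      = aLoop (PySem.List.pyGetD nums (R0 - c) 0) c m xs := by
  induction xs generalizing R0 c m with
  | nil =>
      have hR : (nums.length : Int) = R0 := by simpa using hlen.symm
      rw [hR, PySem.List.pyRange_one_eq_nil le_rfl]
      simp [aLoop]
  | cons x rest ih =>
      have hR0 : 0 ≤ R0 := hc.trans hcR
      have hlt : R0 < (nums.length : Int) := by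
        simp only [List.length_cons] at hlen; push_cast at hlen; omega
      rw [PySem.List.pyRange_one_cons hlt]
      simp only [List.foldl_cons]
      have hx : PySem.List.pyGetD nums R0 0 = x := pvGetD_drop_head nums R0 x rest hR0 hdrop
      have hdrop' : nums.drop (R0 + 1).toNat = rest := by
        have h2 : (nums.drop R0.toNat).drop 1 = rest := by rw [hdrop]; simp
        rw [List.drop_drop] at h2
        rwa [show (R0 + 1).toNat = R0.toNat + 1 by omega]
      have hlen' : (R0 + 1) + rest.length = nums.length := by
        simp only [List.length_cons] at hlen; push_cast at hlen ⊢; omega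
      by_cases hne : x = PySem.List.pyGetD nums (R0 - c) 0
      · have hcond : ¬ (PySem.List.pyGetD nums R0 0 ≠ PySem.List.pyGetD nums (R0 - c) 0) := by
          simp [hx, hne]
        have hstep : pvStepA nums (R0 - c, m) R0 = ((R0 + 1) - (c + 1), max m (c + 1)) := by
          simp only [pvStepA, if_neg hcond, Prod.mk.injEq]
          refine ⟨by ring, ?_⟩
          congr 1
          ring
        rw [hstep, ih (R0+1) (c+1) (max m (c+1)) (by omega) (by omega) hdrop' hlen']
        have hv : PySem.List.pyGetD nums ((R0 + 1) - (c + 1)) 0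
            = PySem.List.pyGetD nums (R0 - c) 0 := by ring_nf
        rw [hv]
        simp [aLoop, hne]
      · have hcond : PySem.List.pyGetD nums R0 0 ≠ PySem.List.pyGetD nums (R0 - c) 0 := by
          simpa [hx] using hne
        have hstep : pvStepA nums (R0 - c, m) R0 = ((R0 + 1) - 1, max m 1) := by
          simp only [pvStepA, if_pos hcond, Prod.mk.injEq]
          refine ⟨by ring, ?_⟩
          congr 1
          ring
        rw [hstep, ih (R0+1) 1 (max m 1) (by omega) (by omega) hdrop' hlen']
        have hv : PySem.List.pyGetD nums ((R0 + 1) - 1) 0 = x := by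
          rw [show R0 + 1 - 1 = R0 by ring, hx]
        rw [hv]
        simp [aLoop, hne]

lemma A_eq (nums : List Int) :
    sliding_window_var nums =
      (match nums with
       | [] => (0 : Int)
       | x :: xs => aLoop x 0 0 (x :: xs)) := by
  match nums with
  | [] => simp [sliding_window_var, PySem.List.pyRange_one_eq_nil]
  | x :: xs =>
      have h := aFold (x :: xs) (x :: xs) 0 0 0 le_rfl le_rfl (by simp) (by simp)
      norm_num at h
      simpa [sliding_window_var] using h

-- aLoop consumes a whole run at once: after the leading run of x's (pending length c),
-- it either finishes or restarts on the next, different element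
lemma aLoop_runs (l : List Int) (x c m : Int) (hc : 0 ≤ c) (hcm : c ≤ m) :
    aLoop x c m l =
      (match l.drop (pvLeadRun x l) with
       | [] => max m (c + (pvLeadRun x l : Int))
       | y :: ys => aLoop y 1 (max (max m (c + (pvLeadRun x l : Int))) 1) ys) := by
  induction l generalizing c m with
  | nil => simp [aLoop, pvLeadRun]; omega
  | cons y ys ih =>
      by_cases hyx : y = x
      · subst hyx
        have hL : pvLeadRun y (y :: ys) = pvLeadRun y ys + 1 := by simp [pvLeadRun]
        have h1 : aLoop y c m (y :: ys) = aLoop y (c + 1) (max m (c + 1)) ys := by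
          simp [aLoop]
        rw [h1, ih (c + 1) (max m (c + 1)) (by omega) (by omega)]
        simp only [hL, List.drop_succ_cons]
        have hmax : max (max m (c + 1)) (c + 1 + (pvLeadRun y ys : Int))
            = max m (c + ((pvLeadRun y ys : Int) + 1)) := by
          rw [max_assoc, max_eq_right (le_add_of_nonneg_right (by exact_mod_cast Nat.zero_le _))]
          congr 1
          ring
        cases hE : ys.drop (pvLeadRun y ys) with
        | nil => push_cast; rw [hmax]
        | cons z zs =>
            push_cast
            rw [hmax]
      · have hL : pvLeadRun x (y :: ys) = 0 := by simp [pvLeadRun, hyx]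
        have h1 : aLoop x c m (y :: ys) = aLoop y 1 (max m 1) ys := by
          simp [aLoop, hyx]
        rw [h1]
        simp only [hL, List.drop_zero]
        congr 1
        push_cast
        omega

-- aLoop over the list = running max over its run lengths
lemma aLoop_maxRuns (l : List Int) (m : Int) (hm : 0 ≤ m) :
    (match l with
     | [] => m
     | x :: xs => aLoop x 0 m (x :: xs)) = (pvRunLens l).foldl max m := by
  induction l using pvRunLens.induct generalizing m with
  | case1 => simp [pvRunLens]
  | case2 x xs k ih =>
      show aLoop x 0 m (x :: xs) = List.foldl max m (pvRunLens (x :: xs))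
      rw [aLoop_runs (x :: xs) x 0 m le_rfl hm]
      have hL : pvLeadRun x (x :: xs) = pvLeadRun x xs + 1 := by simp [pvLeadRun]
      simp only [hL, List.drop_succ_cons, zero_add]
      rw [show pvRunLens (x :: xs)
            = ((pvLeadRun x xs : Int) + 1) :: pvRunLens (xs.drop (pvLeadRun x xs)) by
          rw [pvRunLens]]
      have hk0 : (0 : Int) ≤ (pvLeadRun x xs : Int) := by exact_mod_cast Nat.zero_le _
      cases hE : xs.drop (pvLeadRun x xs) with
      | nil =>
          simp only [pvRunLens, List.foldl_cons, List.foldl_nil]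
          push_cast
          rfl
      | cons y ys =>
          have hM : (0 : Int) ≤ max m ((pvLeadRun x xs : Int) + 1) :=
            le_trans hm (le_max_left _ _)
          have hIH := ih (max m ((pvLeadRun x xs : Int) + 1)) hM
          rw [hE] at hIH
          have hIH2 : aLoop y 0 (max m ((pvLeadRun x xs : Int) + 1)) (y :: ys)
              = List.foldl max (max m ((pvLeadRun x xs : Int) + 1)) (pvRunLens (y :: ys)) := hIH
          have h2 : aLoop y 0 (max m ((pvLeadRun x xs : Int) + 1)) (y :: ys)
              = aLoop y 1 (max (max m ((pvLeadRun x xs : Int) + 1)) 1) ys := by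
            simp [aLoop]
          rw [List.foldl_cons]
          push_cast
          show aLoop y 1 (max (max m ((pvLeadRun x xs : Int) + 1)) 1) ys
              = List.foldl max (max m ((pvLeadRun x xs : Int) + 1)) (pvRunLens (y :: ys))
          rw [← h2]
          exact hIH2

lemma B_eq (nums : List Int) :
    sliding_window_var_alt nums = (pvRunLens nums).foldl max 0 := by
  cases nums with
  | nil => simp [sliding_window_var_alt, pvRunLens, PySem.List.maxD, PySem.List.max?]
  | cons x xs =>
      rw [sliding_window_var_alt, PySem.List.maxD]
      rw [show pvRunLens (x :: xs)
            = ((pvLeadRun x xs : Int) + 1) :: pvRunLens (xs.drop (pvLeadRun x xs)) by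
          rw [pvRunLens]]
      rw [PySem.List.max?_id_cons, Option.getD_some, List.foldl_cons,
        max_eq_right (by positivity : (0 : Int) ≤ (pvLeadRun x xs : Int) + 1)]

-- ===== VERDICT (by name: the statement is the Claim_ definition above) =====
theorem sliding_window_var_spec : Claim_equal_sliding_window_var := by
  intro nums _
  unfold Spec_sliding_window_var
  rw [A_eq, B_eq, ← aLoop_maxRuns nums 0 le_rfl]
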